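-- pv_equiv track=rewrite | github.com/epitaphe360/getyourshare-versio2 | backend/replace_prints.py | determine_log_level
-- ===== SOURCE A (Python) =====
-- def determine_log_level(print_content):
--     """Determine appropriate log level based on content"""
--     content_lower = print_content.lower()
--
--     if any(word in content_lower for word in ['error', 'failed', 'exception', 'critical', 'fatal']):
--         return 'logger.error'
--     elif any(word in content_lower for word in ['warning', 'warn', 'caution']):
--         return 'logger.warning'
--     elif any(word in content_lower for word in ['debug', 'trace']):
--         return 'logger.debug'
--     else:
--         return 'logger.info'
-- ===== SOURCE B (Python) =====
-- KEYWORD_RANKS = [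
--     ('error', 0), ('failed', 0), ('exception', 0), ('critical', 0), ('fatal', 0),
--     ('warning', 1), ('warn', 1), ('caution', 1),
--     ('debug', 2), ('trace', 2),
-- ]
--
-- LEVELS = ['logger.error', 'logger.warning', 'logger.debug', 'logger.info']
--
-- def determine_log_level(print_content):
--     """Determine appropriate log level based on content"""
--     s = print_content.lower()
--     best = 3  # severity rank: 0=error, 1=warning, 2=debug, 3=info
--     for i in range(len(s)):
--         for kw, rank in KEYWORD_RANKS:
--             if rank < best and s.startswith(kw, i):
--                 best = rank
--     return LEVELS[best]
-- ===== Notes on version B (the rewrite author's own statement) =====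
-- stated objective: alternative
-- what changed: Instead of A's keyword-driven if/elif ladder of whole-string substring tests, B makes a single position-driven scan of the lowercased string, checking at each index which ranked keywords start there and keeping the minimum severity rank in an accumulator, then indexing the level name by that rank.
import Mathlib
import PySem

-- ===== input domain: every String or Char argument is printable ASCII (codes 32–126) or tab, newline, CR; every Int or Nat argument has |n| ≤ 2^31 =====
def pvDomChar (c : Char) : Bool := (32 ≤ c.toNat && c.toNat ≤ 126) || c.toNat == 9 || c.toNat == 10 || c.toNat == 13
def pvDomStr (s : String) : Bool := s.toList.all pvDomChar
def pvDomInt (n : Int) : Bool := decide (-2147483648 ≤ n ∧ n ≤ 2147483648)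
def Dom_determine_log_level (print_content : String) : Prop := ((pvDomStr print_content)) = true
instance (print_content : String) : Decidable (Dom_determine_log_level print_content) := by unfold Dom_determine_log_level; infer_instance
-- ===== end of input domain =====

-- B replaces A's keyword-driven if/elif ladder of whole-string substring tests by a single
-- position-driven scan keeping the minimum severity rank found; objective: alternative.

-- ===== PORT A =====
def determine_log_level (print_content : String) : String :=
  let content_lower := PySem.Str.lower print_content
  if ["error", "failed", "exception", "critical", "fatal"].any
      (fun word => PySem.Str.isIn word content_lower) then
    "logger.error"
  else if ["warning", "warn", "caution"].any
      (fun word => PySem.Str.isIn word content_lower) then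
    "logger.warning"
  else if ["debug", "trace"].any
      (fun word => PySem.Str.isIn word content_lower) then
    "logger.debug"
  else
    "logger.info"

-- ===== PORT B =====
def pvKeywordRanks : List (List Char × Nat) :=
  [("error".toList, 0), ("failed".toList, 0), ("exception".toList, 0), ("critical".toList, 0), ("fatal".toList, 0),
   ("warning".toList, 1), ("warn".toList, 1), ("caution".toList, 1),
   ("debug".toList, 2), ("trace".toList, 2)]

def pvLevels : List String := ["logger.error", "logger.warning", "logger.debug", "logger.info"]

-- inner `for kw, rank in KEYWORD_RANKS` body at position i; `s.startswith(kw, i)` is exactly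
-- `startswith` of the suffix s[i:], which is the state the outer recursion carries
def pvStep (suffix : List Char) (best : Nat) : Nat :=
  pvKeywordRanks.foldl
    (fun b kr => if kr.2 < b && PySem.Chars.startswith suffix kr.1 then kr.2 else b) best

-- outer `for i in range(len(s))` loop: the i-th iteration sees the suffix s[i:]
def pvScan (best : Nat) : List Char → Nat
  | [] => best
  | c :: rest => pvScan (pvStep (c :: rest) best) rest

def determine_log_level_alt (print_content : String) : String :=
  -- LEVELS[best]: best starts at 3 and only decreases, so the index is always in range
  pvLevels.getD (pvScan 3 (PySem.Str.lower print_content).toList) "logger.info"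

-- ===== PRECONDITION & SPEC =====
def Spec_determine_log_level (print_content : String) (out : String) : Prop := out = determine_log_level_alt print_content
instance (print_content : String) (out : String) : Decidable (Spec_determine_log_level print_content out) := by unfold Spec_determine_log_level; infer_instance

-- ===== CLAIM (what is proved, stated in full; the proofs are below) =====
def Claim_equal_determine_log_level : Prop := ∀ (print_content : String), Dom_determine_log_level print_content → Spec_determine_log_level print_content (determine_log_level print_content)

-- ===== LEMMAS AND PROOFS =====

-- the three rank groups of pvKeywordRanks
def pvKws0 : List (List Char) := [("error".toList), ("failed".toList), ("exception".toList), ("critical".toList), ("fatal".toList)]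
def pvKws1 : List (List Char) := [("warning".toList), ("warn".toList), ("caution".toList)]
def pvKws2 : List (List Char) := [("debug".toList), ("trace".toList)]

-- rank contributed by keywords starting at this exact position
def pvG (s : List Char) : Nat :=
  if pvKws0.any (fun kw => PySem.Chars.startswith s kw) then 0
  else if pvKws1.any (fun kw => PySem.Chars.startswith s kw) then 1
  else if pvKws2.any (fun kw => PySem.Chars.startswith s kw) then 2
  else 3

-- minimum rank over all (nonempty) suffixes
def pvR : List Char → Nat
  | [] => 3
  | c :: t => min (pvG (c :: t)) (pvR t)

lemma pvFoldl_const (kws : List (List Char)) (r : Nat) (s : List Char) (b : Nat) :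
    (kws.map (fun kw => (kw, r))).foldl
      (fun b kr => if kr.2 < b && PySem.Chars.startswith s kr.1 then kr.2 else b) b
    = if kws.any (fun kw => PySem.Chars.startswith s kw) && decide (r < b) then r else b := by
  induction kws generalizing b with
  | nil => simp
  | cons kw kws ih =>
    simp at ih
    simp only [List.map_cons, List.foldl_cons, List.any_cons]
    rcases Bool.dichotomy (PySem.Chars.startswith s kw) with h | h <;>
      by_cases hb : r < b <;> simp [h, hb, ih]

lemma pvStep_eq (s : List Char) (b : Nat) (hb : b ≤ 3) : pvStep s b = min b (pvG s) := by
  have hsplit : pvKeywordRanks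
      = (pvKws0.map (fun kw => (kw, 0))) ++ (pvKws1.map (fun kw => (kw, 1)))
        ++ (pvKws2.map (fun kw => (kw, 2))) := rfl
  unfold pvStep
  rw [hsplit, List.foldl_append, List.foldl_append, pvFoldl_const, pvFoldl_const, pvFoldl_const]
  unfold pvG
  by_cases h0 : pvKws0.any (fun kw => PySem.Chars.startswith s kw) = true <;>
  by_cases h1 : pvKws1.any (fun kw => PySem.Chars.startswith s kw) = true <;>
  by_cases h2 : pvKws2.any (fun kw => PySem.Chars.startswith s kw) = true <;>
    simp [h0, h1, h2, hb] <;> first | omega | (split_ifs <;> omega)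

lemma pvG_le (s : List Char) : pvG s ≤ 3 := by
  unfold pvG; split_ifs <;> omega

lemma pvR_le (L : List Char) : pvR L ≤ 3 := by
  induction L with
  | nil => simp [pvR]
  | cons c t ih => simp only [pvR]; omega

set_option maxHeartbeats 2000000 in
lemma pvScan_eq (L : List Char) : ∀ b : Nat, b ≤ 3 → pvScan b L = min b (pvR L) := by
  induction L with
  | nil =>
    intro b hb
    have h0 : pvScan b [] = b := rfl
    rw [h0]; simp only [pvR]; omega
  | cons c t ih =>
    intro b hb
    have hg := pvG_le (c :: t)
    have hcons : pvScan b (c :: t) = pvScan (pvStep (c :: t) b) t := rfl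
    rw [hcons, pvStep_eq _ _ hb, ih _ (by omega)]
    simp only [pvR]
    omega

lemma pvIsIn_cons (kw : List Char) (c : Char) (t : List Char) :
    PySem.Chars.isIn kw (c :: t)
      = (PySem.Chars.startswith (c :: t) kw || PySem.Chars.isIn kw t) := by
  rw [Bool.eq_iff_iff]
  simp [PySem.Chars.isIn_iff_infix, PySem.Chars.startswith_iff, List.infix_cons_iff]

lemma pvAny_isIn_cons (kws : List (List Char)) (c : Char) (t : List Char) :
    kws.any (fun kw => PySem.Chars.isIn kw (c :: t))
      = (kws.any (fun kw => PySem.Chars.startswith (c :: t) kw)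
         || kws.any (fun kw => PySem.Chars.isIn kw t)) := by
  induction kws with
  | nil => simp
  | cons kw kws ih =>
    rw [List.any_cons, List.any_cons, List.any_cons, pvIsIn_cons, ih]
    cases PySem.Chars.startswith (c :: t) kw <;> cases PySem.Chars.isIn kw t <;> simp

lemma pvMinIf (a b c d e f : Bool) :
    min (if a then 0 else if b then 1 else if c then 2 else 3)
        (if d then 0 else if e then 1 else if f then 2 else (3 : Nat))
    = if (a || d) then 0 else if (b || e) then 1 else if (c || f) then 2 else 3 := by
  revert a b c d e f; decide

lemma pvR_eq (L : List Char) :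
    pvR L = if pvKws0.any (fun kw => PySem.Chars.isIn kw L) then 0
      else if pvKws1.any (fun kw => PySem.Chars.isIn kw L) then 1
      else if pvKws2.any (fun kw => PySem.Chars.isIn kw L) then 2
      else 3 := by
  induction L with
  | nil => decide
  | cons c t ih =>
    simp only [pvR, ih, pvAny_isIn_cons]
    unfold pvG
    exact pvMinIf _ _ _ _ _ _

-- ===== VERDICT (by name: the statement is the Claim_ definition above) =====
theorem determine_log_level_spec : Claim_equal_determine_log_level := by
  intro s _
  unfold Spec_determine_log_level determine_log_level determine_log_level_alt
  rw [pvScan_eq _ 3 (by omega)]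
  have h3 : min 3 (pvR (PySem.Str.lower s).toList) = pvR (PySem.Str.lower s).toList := by
    have := pvR_le (PySem.Str.lower s).toList; omega
  rw [h3, pvR_eq]
  simp only [List.any_cons, List.any_nil, PySem.Str.isIn_eq, pvKws0, pvKws1, pvKws2]
  split_ifs <;> rfl
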